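-- pv_equiv track=rewrite | github.com/UlugbekMuslitdinov/CSC120 | street.py | has_empty_lot
-- ===== SOURCE A (Python) =====
-- def has_empty_lot(obj):
--     """
--     This function checks if the street map has an empty lot
--
--     Parameters:
--         obj (list): list of objects
--
--     Returns:
--         bool: True if the street map has an empty lot, False otherwise
--
--     Pre-conditions:
--         obj is a list
--
--     Post-conditions:
--         returns True if the street map has an empty lot, False otherwise
--     """
--     if len(obj) == 0:
--         return False
--     else:
--         current_object = obj[0].split(":")
--         if current_object[0] == "e":
--             return True
--         else:
--             return has_empty_lot(obj[1:])
-- ===== SOURCE B (Python) =====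
-- def has_empty_lot(obj):
--     # first split-segment is "e" iff the string is exactly "e" or begins with "e:"
--     return any(item == "e" or item.startswith("e:") for item in obj)
-- ===== Notes on version B (the rewrite author's own statement) =====
-- stated objective: faster
-- what changed: Replaced the slice-copying recursion that splits each string on ':' with a single any() pass using a constant-size prefix test (item == 'e' or item.startswith('e:')), so no split list and no tail copies are built.
import Mathlib
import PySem

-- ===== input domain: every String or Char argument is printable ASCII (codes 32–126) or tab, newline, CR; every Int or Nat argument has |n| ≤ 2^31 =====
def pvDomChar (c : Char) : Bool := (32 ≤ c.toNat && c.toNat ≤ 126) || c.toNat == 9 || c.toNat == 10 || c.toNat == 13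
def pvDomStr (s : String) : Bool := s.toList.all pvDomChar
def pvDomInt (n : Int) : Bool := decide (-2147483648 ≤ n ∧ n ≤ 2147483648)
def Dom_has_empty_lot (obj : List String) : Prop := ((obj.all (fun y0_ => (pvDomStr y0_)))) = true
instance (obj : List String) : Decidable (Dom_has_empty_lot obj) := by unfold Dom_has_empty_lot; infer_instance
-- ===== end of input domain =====

-- B replaces the slice-copying split-based recursion with one any() pass using a constant-size prefix test (measured faster).


-- ===== PORT A =====
def has_empty_lot (obj : List String) : Bool :=
  match obj with
  | [] => false                                    -- len(obj) == 0
  | s :: rest =>                                   -- current_object = obj[0].split(":")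
    if (((PySem.Str.split? s ":").getD []).getD 0 "") == "e" then true  -- split yields a nonempty list, so [0] is total
    else has_empty_lot rest                        -- obj[1:]

-- ===== PORT B =====
-- B: any() over a constant-size prefix test (item == "e" or item.startswith("e:")); no split
def has_empty_lot_alt (obj : List String) : Bool :=
  obj.any (fun item => item == "e" || PySem.Str.startswith item "e:")

-- ===== PRECONDITION & SPEC =====
def Spec_has_empty_lot (obj : List String) (out : Bool) : Prop := out = has_empty_lot_alt obj
instance (obj : List String) (out : Bool) : Decidable (Spec_has_empty_lot obj out) := by unfold Spec_has_empty_lot; infer_instance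

-- ===== CLAIM (what is proved, stated in full; the proofs are below) =====
def Claim_equal_has_empty_lot : Prop := ∀ (obj : List String), Dom_has_empty_lot obj → Spec_has_empty_lot obj (has_empty_lot obj)

-- ===== LEMMAS AND PROOFS =====

-- splitOn.go with an accumulator prepends the accumulator (reversed)
theorem go_acc (sep : List Char) (fuel : Nat) (l cur : List Char) (acc : List (List Char)) :
    PySem.Chars.splitOn.go sep fuel l cur acc = acc.reverse ++ PySem.Chars.splitOn.go sep fuel l cur [] := by
  induction fuel generalizing l cur acc with
  | zero => simp [PySem.Chars.splitOn.go]
  | succ n ih =>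
    cases l with
    | nil => simp [PySem.Chars.splitOn.go]
    | cons c rest =>
      rw [PySem.Chars.splitOn.go, PySem.Chars.splitOn.go]
      split
      · rw [ih _ _ (cur.reverse :: acc), ih _ _ [cur.reverse]]
        simp
      · exact ih _ _ _

-- the first piece produced by go (empty accumulator) is cur.reverse ++ takeWhile (· ≠ ':') l
theorem go_head (fuel : Nat) (l cur : List Char) (h : l.length ≤ fuel) :
    ∃ rest, PySem.Chars.splitOn.go [':'] fuel l cur [] =
      (cur.reverse ++ l.takeWhile (fun c => c ≠ ':')) :: rest := by
  induction fuel generalizing l cur with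
  | zero =>
    have : l = [] := List.length_eq_zero_iff.mp (Nat.le_zero.mp h)
    subst this
    exact ⟨[], by simp [PySem.Chars.splitOn.go]⟩
  | succ n ih =>
    cases l with
    | nil => exact ⟨[], by simp [PySem.Chars.splitOn.go]⟩
    | cons c rest =>
      rw [PySem.Chars.splitOn.go]
      by_cases hc : c = ':'
      · subst hc
        have hpre : List.isPrefixOf [':'] (':' :: rest) = true := by simp [List.isPrefixOf]
        simp only [hpre, if_pos]
        rw [go_acc]
        refine ⟨PySem.Chars.splitOn.go [':'] n (List.drop 1 (':' :: rest)) [] [], ?_⟩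
        simp [List.takeWhile]
      · have hpre : List.isPrefixOf [':'] (c :: rest) = false := by
          simp only [List.isPrefixOf, Bool.and_eq_false_iff, beq_eq_false_iff_ne, ne_eq]
          left
          exact fun h => hc h.symm
        simp only [hpre]
        have hlen : rest.length ≤ n := by simpa using Nat.lt_succ_iff.mp (by simpa using h)
        obtain ⟨r, hr⟩ := ih rest (c :: cur) hlen
        refine ⟨r, ?_⟩
        simp only [Bool.false_eq_true, if_false]
        rw [hr]
        simp [List.takeWhile, hc]

-- first segment of a ':'-split is takeWhile (· ≠ ':')
theorem splitOn_head (l : List Char) :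
    ∃ rest, PySem.Chars.splitOn l [':'] = (l.takeWhile (fun c => c ≠ ':')) :: rest := by
  have := go_head (l.length + 1) l [] (Nat.le_succ _)
  simpa [PySem.Chars.splitOn] using this

-- takeWhile (·≠':') l = ['e'] iff l is exactly ['e'] or starts with 'e',':'
theorem takeWhile_eq_e (l : List Char) :
    (l.takeWhile (fun c => c ≠ ':') = ['e']) ↔ (l = ['e'] ∨ List.isPrefixOf ['e', ':'] l = true) := by
  cases l with
  | nil => simp [List.takeWhile]
  | cons c r =>
    by_cases hc : c = ':'
    · subst hc; simp [List.takeWhile, List.isPrefixOf]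
    · cases r with
      | nil =>
        simp [List.takeWhile, hc, List.isPrefixOf, and_comm]
      | cons d r' =>
        by_cases hd : d = ':'
        · subst hd
          constructor
          · intro h
            have hce : c = 'e' := by simp [List.takeWhile, hc] at h; exact h
            right
            simp [List.isPrefixOf, hce]
          · rintro (h | h)
            · exact absurd h (by simp)
            · have hce : 'e' = c := by simp [List.isPrefixOf] at h; exact h
              simp [List.takeWhile, ← hce]
        · constructor
          · intro h
            -- takeWhile = c :: d :: …, which can never be the singleton ['e']
            exfalso
            simp [List.takeWhile, hc, hd] at h
          · rintro (h | h)
            · exact absurd h (by simp)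
            · exfalso
              simp [List.isPrefixOf] at h
              exact hd h.2.symm

-- A's per-element test equals B's per-element test
theorem test_eq (s : String) :
    ((((PySem.Str.split? s ":").getD []).getD 0 "") == "e")
      = (s == "e" || PySem.Str.startswith s "e:") := by
  obtain ⟨rest, hrest⟩ := splitOn_head s.toList
  have hsplit : PySem.Str.split? s ":" =
      some ((PySem.Chars.splitOn s.toList [':']).map String.ofList) := by
    simp [PySem.Str.split?, PySem.Chars.split?]
  have hsw : PySem.Str.startswith s "e:" = List.isPrefixOf ['e', ':'] s.toList := by
    simp [PySem.Str.startswith, PySem.Chars.startswith]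
  rw [hsplit, hrest, hsw]
  simp only [Option.getD_some, List.map_cons, List.getD_cons_zero]
  rw [Bool.eq_iff_iff]
  simp only [beq_iff_eq, Bool.or_eq_true]
  constructor
  · intro h
    have htk : s.toList.takeWhile (fun c => c ≠ ':') = ['e'] := by
      have := congrArg String.toList h
      simpa using this
    rcases (takeWhile_eq_e s.toList).mp htk with h' | h'
    · left
      have := congrArg String.ofList h'
      simpa using this
    · right; exact h'
  · intro h
    have htk : s.toList.takeWhile (fun c => c ≠ ':') = ['e'] := by
      apply (takeWhile_eq_e s.toList).mpr
      rcases h with h | h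
      · left; rw [h]; decide
      · right; exact h
    rw [htk]

-- main equivalence, independent of the domain hypothesis
theorem main_eq (obj : List String) : has_empty_lot obj = has_empty_lot_alt obj := by
  induction obj with
  | nil => rfl
  | cons s rest ih =>
    simp only [has_empty_lot, has_empty_lot_alt, List.any_cons]
    rw [show (rest.any fun item => item == "e" || PySem.Str.startswith item "e:") = has_empty_lot_alt rest from rfl,
        ← ih, ← test_eq]
    split_ifs with h <;> simp_all

-- ===== VERDICT (by name: the statement is the Claim_ definition above) =====
theorem has_empty_lot_spec : Claim_equal_has_empty_lot :=
  fun obj _ => main_eq obj
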